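-- pv_equiv track=rewrite | github.com/sudarshan85/task_utils | tokenizer.py | _split_on_punc
-- ===== SOURCE A (Python) =====
-- import unicodedata
--
-- def is_punc(char):
--   cp = ord(char)
--   if ((cp >= 33 and cp <= 47) or (cp >= 58 and cp <= 64) or (cp >= 91 and cp <= 96) or (cp >= 123 and cp <= 126)):
--     return True
--   cat = unicodedata.category(char)
--   if cat.startswith('P'):
--     return True
--
--   return False
--
-- def _split_on_punc(token):
--   chars = list(token)
--   i = 0
--   start_new_token = True
--   output = []
--   while i < len(chars):
--     char = chars[i]
--     if is_punc(char):
--       output.append([char])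
--       start_new_token = True
--     else:
--       if start_new_token:
--         output.append([])
--       start_new_token = False
--       output[-1].append(char)
--     i += 1
--
--   return [''.join(x) for x in output]
-- ===== SOURCE B (Python) =====
-- import unicodedata
--
-- def is_punc(char):
--   cp = ord(char)
--   if ((cp >= 33 and cp <= 47) or (cp >= 58 and cp <= 64) or (cp >= 91 and cp <= 96) or (cp >= 123 and cp <= 126)):
--     return True
--   cat = unicodedata.category(char)
--   if cat.startswith('P'):
--     return True
--
--   return False
--
-- def _split_on_punc(token):
--   # Two-pointer run extraction: each punctuation char is emitted alone,
--   # each maximal non-punctuation run is emitted as one slice.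
--   output = []
--   n = len(token)
--   i = 0
--   while i < n:
--     if is_punc(token[i]):
--       output.append(token[i])
--       i += 1
--     else:
--       j = i + 1
--       while j < n and not is_punc(token[j]):
--         j += 1
--       output.append(token[i:j])
--       i = j
--   return output
-- ===== Notes on version B (the rewrite author's own statement) =====
-- stated objective: idiomatic
-- what changed: Replaced the char-by-char loop with a start_new_token flag that mutates the last list-of-chars element (followed by a join pass) with a two-pointer run scan that emits each punctuation char alone and each maximal non-punctuation run as one string slice, with no intermediate list-of-lists and no join pass.
import Mathlib
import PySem

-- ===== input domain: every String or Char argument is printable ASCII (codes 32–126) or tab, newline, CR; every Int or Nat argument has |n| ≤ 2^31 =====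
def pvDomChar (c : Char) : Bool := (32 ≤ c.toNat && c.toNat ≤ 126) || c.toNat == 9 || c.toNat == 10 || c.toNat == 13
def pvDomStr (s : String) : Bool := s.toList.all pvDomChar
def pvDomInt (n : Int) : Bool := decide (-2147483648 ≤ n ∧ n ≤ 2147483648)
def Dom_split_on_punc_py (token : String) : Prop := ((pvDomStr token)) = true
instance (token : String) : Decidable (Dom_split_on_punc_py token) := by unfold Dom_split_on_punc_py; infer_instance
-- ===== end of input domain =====

-- B replaces A's flag-driven char loop (list-of-lists + final join) by a two-pointer run scan
-- emitting punctuation chars alone and maximal non-punctuation runs as slices (idiomatic, same cost).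

-- ===== PORT A =====
-- is_punc: the ASCII-range checks, exactly as A writes them.  A's further branch
-- `unicodedata.category(char).startswith('P')` is exact as `false` on the stated domain
-- (printable ASCII + tab/newline/CR): every such char of Unicode category P* already lies
-- in the four ranges, so the branch never flips the result there.
def pvIsPunc (c : Char) : Bool :=
  let cp := c.toNat
  (33 ≤ cp && cp ≤ 47) || (58 ≤ cp && cp ≤ 64) || (91 ≤ cp && cp ≤ 96) || (123 ≤ cp && cp ≤ 126)

-- output[-1].append(char): rewrite the last element (Python raises on [], unreachable here;
-- getD [] is the total reading).
def pvAppendLast (l : List (List Char)) (c : Char) : List (List Char) :=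
  l.dropLast ++ [(l.getLast?.getD []) ++ [c]]

-- A's while-loop over chars with the start_new_token flag and the growing output.
def pvALoop : List Char → Bool → List (List Char) → List (List Char)
  | [], _, output => output
  | c :: rest, start_new_token, output =>
    if pvIsPunc c then
      pvALoop rest true (output ++ [[c]])
    else
      let output := if start_new_token then output ++ [[]] else output
      pvALoop rest false (pvAppendLast output c)

def split_on_punc_py (token : String) : List String :=
  (pvALoop token.toList true []).map (fun x => String.ofList x)

-- ===== PORT B =====
-- B's two-pointer scan: a punctuation char is emitted alone; otherwise the inner while-loop
-- advancing j is the takeWhile of the non-punctuation run, emitted as one slice.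
def pvBLoop : List Char → List String
  | [] => []
  | c :: rest =>
    if pvIsPunc c then
      String.ofList [c] :: pvBLoop rest
    else
      let run := rest.takeWhile (fun x => ! pvIsPunc x)
      String.ofList (c :: run) :: pvBLoop (rest.drop run.length)
termination_by cs => cs.length
decreasing_by
  all_goals simp only [List.length_cons, List.length_drop]
  all_goals omega

def split_on_punc_py_alt (token : String) : List String :=
  pvBLoop token.toList

-- ===== PRECONDITION & SPEC =====
def Spec_split_on_punc_py (token : String) (out : List String) : Prop := out = split_on_punc_py_alt token
instance (token : String) (out : List String) : Decidable (Spec_split_on_punc_py token out) := by unfold Spec_split_on_punc_py; infer_instance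

-- ===== CLAIM (what is proved, stated in full; the proofs are below) =====
def Claim_equal_split_on_punc_py : Prop := ∀ (token : String), Dom_split_on_punc_py token → Spec_split_on_punc_py token (split_on_punc_py token)

-- ===== LEMMAS AND PROOFS =====

-- char-list shape of B's result, used only in the proofs
def pvRuns : List Char → List (List Char)
  | [] => []
  | c :: rest =>
    if pvIsPunc c then
      [c] :: pvRuns rest
    else
      let run := rest.takeWhile (fun x => ! pvIsPunc x)
      (c :: run) :: pvRuns (rest.drop run.length)
termination_by cs => cs.length
decreasing_by
  all_goals simp only [List.length_cons, List.length_drop]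
  all_goals omega

lemma pvAppendLast_concat (l : List (List Char)) (cur : List Char) (c : Char) :
    pvAppendLast (l ++ [cur]) c = l ++ [cur ++ [c]] := by
  simp [pvAppendLast]

lemma pvALoop_key : ∀ cs : List Char,
    (∀ output, pvALoop cs true output = output ++ pvRuns cs) ∧
    (∀ output cur, pvALoop cs false (output ++ [cur]) =
      output ++ (cur ++ cs.takeWhile (fun x => ! pvIsPunc x)) ::
        pvRuns (cs.drop (cs.takeWhile (fun x => ! pvIsPunc x)).length)) := by
  intro cs
  induction cs with
  | nil => constructor <;> intro output <;> simp [pvALoop, pvRuns]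
  | cons c rest ih =>
    by_cases hp : pvIsPunc c = true
    · constructor
      · intro output
        rw [pvRuns]
        simp only [pvALoop, hp, if_pos, ih.1, List.append_assoc]
        rfl
      · intro output cur
        rw [show (c :: rest).takeWhile (fun x => ! pvIsPunc x) = [] by
              simp [List.takeWhile, hp]]
        simp only [pvALoop, hp, if_pos, List.length_nil, List.drop_zero, List.append_nil]
        rw [show output ++ [cur] ++ [[c]] = (output ++ [cur]) ++ [[c]] by simp,
            pvRuns]
        simp [hp, ih.1]
    · have hp' : pvIsPunc c = false := by simpa using hp
      have htw : (c :: rest).takeWhile (fun x => ! pvIsPunc x)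
          = c :: rest.takeWhile (fun x => ! pvIsPunc x) := by
        simp [List.takeWhile, hp']
      constructor
      · intro output
        rw [pvRuns]
        simp only [pvALoop, hp', Bool.false_eq_true, reduceIte]
        rw [pvAppendLast_concat, ih.2]
        simp
      · intro output cur
        rw [htw]
        simp only [pvALoop, hp', Bool.false_eq_true, reduceIte]
        rw [pvAppendLast_concat, ih.2]
        simp

theorem pvBLoop_eq_runs (cs : List Char) :
    pvBLoop cs = (pvRuns cs).map (fun x => String.ofList x) := by
  fun_induction pvBLoop cs with
  | case1 => simp [pvRuns]
  | case2 c rest hp ih => rw [pvRuns]; simp [hp, ih]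
  | case3 c rest hp run ih => rw [pvRuns]; simp [hp, run, ih]

-- ===== VERDICT (by name: the statement is the Claim_ definition above) =====
theorem split_on_punc_py_spec : Claim_equal_split_on_punc_py := by
  intro token _
  unfold Spec_split_on_punc_py split_on_punc_py split_on_punc_py_alt
  rw [(pvALoop_key token.toList).1 [], pvBLoop_eq_runs]
  simp
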